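-- pv_equiv track=rewrite | github.com/dongeun6072/BaekJoon_Python | 2231_분해합.py | divnum
-- ===== SOURCE A (Python) =====
-- def divnum(n):
--     print_num = 0
--     for i in range(1, n+1):
--         div_num = list(map(int, str(i)))
--         sum_num = i + sum(div_num)
--         if(sum_num == n):
--             print_num = i
--             break
--
--     return print_num
-- ===== SOURCE B (Python) =====
-- def divnum(n):
--     def ds(i):
--         s = 0
--         while i > 0:
--             s += i % 10
--             i //= 10
--         return s
--     start = max(1, n - 9 * len(str(n)))
--     for i in range(start, n + 1):
--         if i + ds(i) == n:
--             return i
--     return 0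
-- ===== Notes on version B (the rewrite author's own statement) =====
-- stated objective: faster
-- what changed: B starts the scan at max(1, n - 9*len(str(n))) instead of 1 (any i with i+digitsum(i)=n lies in that window) and computes the digit sum arithmetically with %/// instead of via str() and map(int, ...).
import Mathlib
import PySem

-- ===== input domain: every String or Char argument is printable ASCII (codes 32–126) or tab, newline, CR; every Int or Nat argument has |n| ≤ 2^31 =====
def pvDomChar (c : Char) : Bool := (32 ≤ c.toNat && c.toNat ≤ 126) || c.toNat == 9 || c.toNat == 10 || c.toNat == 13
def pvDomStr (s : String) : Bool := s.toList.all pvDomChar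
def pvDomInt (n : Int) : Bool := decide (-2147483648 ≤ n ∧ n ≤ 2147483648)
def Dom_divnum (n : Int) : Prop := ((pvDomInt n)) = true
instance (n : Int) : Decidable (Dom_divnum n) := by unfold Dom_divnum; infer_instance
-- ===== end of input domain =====

-- B starts the scan at max(1, n - 9*len(str(n))) instead of 1 and computes the digit
-- sum arithmetically (% / //) instead of via str() and map(int, ...); measurably faster.

-- ===== PORT A =====
-- int(c) for a one-character string c; ofChars? is none only for a non-digit, which the
-- loop never produces (str(i) of i ≥ 1 is all digits), so the .getD 0 default is unreached.
def pvCharInt (c : Char) : Int := (PySem.Int.ofChars? [c]).getD 0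

-- the 'for i in range(1, n+1)' loop with its break; print_num stays 0 if no break fires
def pvLoopA (n : Int) : List Int → Int
  | [] => 0
  | i :: rest =>
      let div_num : List Int := (PySem.Int.toChars i).map pvCharInt
      let sum_num : Int := i + div_num.sum
      if sum_num = n then i else pvLoopA n rest

def divnum (n : Int) : Int := pvLoopA n (PySem.List.pyRange 1 (n + 1) 1)

-- ===== PORT B =====
-- ds(i): 'while i > 0: s += i % 10; i //= 10'
def pvDs (i : Int) : Int :=
  if i ≤ 0 then 0
  else PySem.Int.mod i 10 + pvDs (PySem.Int.floordiv i 10)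
termination_by i.toNat
decreasing_by
  rw [PySem.Int.floordiv_eq_ediv_of_pos (by omega : (0:Int) < 10)]
  omega

def pvLoopB (n : Int) : List Int → Int
  | [] => 0
  | i :: rest => if i + pvDs i = n then i else pvLoopB n rest

def divnum_alt (n : Int) : Int :=
  let start : Int := max 1 (n - 9 * PySem.Str.len (PySem.Int.toStr n))
  pvLoopB n (PySem.List.pyRange start (n + 1) 1)

-- ===== PRECONDITION & SPEC =====
def Spec_divnum (n : Int) (out : Int) : Prop := out = divnum_alt n
instance (n : Int) (out : Int) : Decidable (Spec_divnum n out) := by unfold Spec_divnum; infer_instance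

-- ===== CLAIM (what is proved, stated in full; the proofs are below) =====
def Claim_equal_divnum : Prop := ∀ (n : Int), Dom_divnum n → Spec_divnum n (divnum n)

-- ===== LEMMAS AND PROOFS =====

lemma pvToDigitsCore_succ (b f n : Nat) (acc : List Char) :
    Nat.toDigitsCore b (f + 1) n acc =
      if n / b = 0 then (n % b).digitChar :: acc
      else Nat.toDigitsCore b f (n / b) ((n % b).digitChar :: acc) := rfl

-- Nat.toDigitsCore with enough fuel produces the base-10 digits, most significant first
lemma pvToDigitsCore_eq (f : Nat) : ∀ (m : Nat) (acc : List Char), 0 < m → m < f →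
    Nat.toDigitsCore 10 f m acc = ((Nat.digits 10 m).reverse.map Nat.digitChar) ++ acc := by
  induction f with
  | zero => intro m acc h1 h2; omega
  | succ f ih =>
    intro m acc h1 h2
    rw [pvToDigitsCore_succ]
    by_cases hdiv : m / 10 = 0
    · have hm10 : m < 10 := by omega
      rw [if_pos hdiv, Nat.digits_def' (by norm_num : 1 < 10) h1, hdiv]
      simp [Nat.mod_eq_of_lt hm10]
    · rw [if_neg hdiv]
      rw [ih (m / 10) _ (by omega) (by omega)]
      rw [Nat.digits_def' (by norm_num : 1 < 10) h1]
      simp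

lemma pvToChars_pos (m : Nat) (h : 0 < m) :
    PySem.Int.toChars (m : Int) = (Nat.digits 10 m).reverse.map Nat.digitChar := by
  have h0 : ¬ ((m : Int) < 0) := by omega
  simp only [PySem.Int.toChars, h0, if_false, Int.toNat_natCast, Nat.toDigits]
  rw [pvToDigitsCore_eq (m + 1) m [] h (by omega), List.append_nil]

lemma pvCharInt_digitChar (d : Nat) (hd : d < 10) : pvCharInt (Nat.digitChar d) = (d : Int) := by
  interval_cases d <;> decide

lemma pvDs_natCast (m : Nat) : pvDs (m : Int) = ((Nat.digits 10 m).sum : Int) := by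
  induction m using Nat.strong_induction_on with
  | _ m ih =>
    rw [pvDs]
    by_cases h : (m : Int) ≤ 0
    · have : m = 0 := by omega
      simp [this]
    · rw [if_neg h]
      have hm : 0 < m := by omega
      have hmod : PySem.Int.mod (m : Int) 10 = ((m % 10 : Nat) : Int) := by
        exact_mod_cast PySem.Int.mod_natCast m 10
      have hdiv : PySem.Int.floordiv (m : Int) 10 = ((m / 10 : Nat) : Int) := by
        exact_mod_cast PySem.Int.floordiv_natCast m 10
      rw [hmod, hdiv, ih (m / 10) (by omega)]
      rw [Nat.digits_def' (by norm_num : 1 < 10) hm]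
      push_cast
      rw [List.map_cons, List.sum_cons]
      omega

-- the digit sum A computes from str(i) equals B's arithmetic digit sum
lemma pvDigitsA_eq_pvDs (i : Int) (h : 0 ≤ i) :
    ((PySem.Int.toChars i).map pvCharInt).sum = pvDs i := by
  obtain ⟨m, rfl⟩ : ∃ m : Nat, i = (m : Int) := ⟨i.toNat, by omega⟩
  rcases Nat.eq_zero_or_pos m with hm | hm
  · subst hm
    rw [pvDs]
    norm_num
    decide
  · rw [pvToChars_pos m hm, pvDs_natCast m, List.map_map]
    have hmap : ((Nat.digits 10 m).reverse.map (pvCharInt ∘ Nat.digitChar)) =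
        (Nat.digits 10 m).reverse.map Int.ofNat := by
      apply List.map_congr_left
      intro d hd
      rw [List.mem_reverse] at hd
      exact pvCharInt_digitChar d (Nat.digits_lt_base (by norm_num) hd)
    rw [hmap, List.map_reverse, List.sum_reverse]
    simp only [Nat.cast_list_sum]
    rfl

lemma pvLen_toChars (n : Int) :
    PySem.Str.len (PySem.Int.toStr n) = ((PySem.Int.toChars n).length : Int) := by
  rw [PySem.Str.len_eq, PySem.Int.toList_toStr]

-- digit-sum bound: for 1 ≤ i ≤ n, ds(i) ≤ 9 * len(str(n))
lemma pvDs_le (n i : Int) (h1 : 1 ≤ i) (h2 : i ≤ n) :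
    pvDs i ≤ 9 * ((PySem.Int.toChars n).length : Int) := by
  obtain ⟨m, rfl⟩ : ∃ m : Nat, i = (m : Int) := ⟨i.toNat, by omega⟩
  obtain ⟨k, rfl⟩ : ∃ k : Nat, n = (k : Int) := ⟨n.toNat, by omega⟩
  have hm : 0 < m := by omega
  have hk : 0 < k := by omega
  have hmk : m ≤ k := by omega
  rw [pvDs_natCast m, pvToChars_pos k hk]
  simp only [List.length_map, List.length_reverse]
  have hsum : (Nat.digits 10 m).sum ≤ 9 * (Nat.digits 10 m).length := by
    calc (Nat.digits 10 m).sum ≤ (Nat.digits 10 m).length * 9 := by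
          apply List.sum_le_card_nsmul
          intro d hd
          have := Nat.digits_lt_base (by norm_num) hd
          omega
    _ = 9 * (Nat.digits 10 m).length := by ring
  have hlen : (Nat.digits 10 m).length ≤ (Nat.digits 10 k).length := by
    rw [Nat.length_digits 10 m (by norm_num) (by omega), Nat.length_digits 10 k (by norm_num) (by omega)]
    have := Nat.log_mono_right (b := 10) hmk
    omega
  have : (Nat.digits 10 m).sum ≤ 9 * (Nat.digits 10 k).length := by omega
  exact_mod_cast this

-- if no element of the prefix fires A's break, A's loop reduces to the suffix
lemma pvLoopA_append (n : Int) (xs ys : List Int)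
    (h : ∀ i ∈ xs, i + ((PySem.Int.toChars i).map pvCharInt).sum ≠ n) :
    pvLoopA n (xs ++ ys) = pvLoopA n ys := by
  induction xs with
  | nil => rfl
  | cons x xs ih =>
    rw [List.cons_append]
    simp only [pvLoopA]
    rw [if_neg (h x List.mem_cons_self)]
    exact ih (fun i hi => h i (List.mem_cons_of_mem _ hi))

-- on lists of nonnegative numbers the two loops agree
lemma pvLoopA_eq_pvLoopB (n : Int) (xs : List Int) (h : ∀ i ∈ xs, 0 ≤ i) :
    pvLoopA n xs = pvLoopB n xs := by
  induction xs with
  | nil => rfl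
  | cons x xs ih =>
    simp only [pvLoopA, pvLoopB]
    rw [pvDigitsA_eq_pvDs x (h x List.mem_cons_self)]
    rcases eq_or_ne (x + pvDs x) n with he | he
    · rw [if_pos he, if_pos he]
    · rw [if_neg he, if_neg he, ih (fun i hi => h i (List.mem_cons_of_mem _ hi))]

-- ===== VERDICT (by name: the statement is the Claim_ definition above) =====
theorem divnum_spec : Claim_equal_divnum := by
  intro n _
  show divnum n = divnum_alt n
  simp only [divnum, divnum_alt, pvLen_toChars]
  set L : Int := ((PySem.Int.toChars n).length : Int) with hL
  have hL0 : 0 ≤ L := by rw [hL]; exact_mod_cast Nat.zero_le _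
  set s : Int := max 1 (n - 9 * L) with hs
  have hs1 : 1 ≤ s := le_max_left _ _
  by_cases hn : n + 1 ≤ 1
  · rw [PySem.List.pyRange_one_eq_nil hn, PySem.List.pyRange_one_eq_nil (by omega)]
    rfl
  · have hsn : s ≤ n + 1 := by
      rcases max_cases 1 (n - 9 * L) with ⟨h1, _⟩ | ⟨h1, _⟩ <;> omega
    rw [PySem.List.pyRange_one_append 1 s (n + 1) hs1 hsn]
    rw [pvLoopA_append n _ _ ?_]
    · apply pvLoopA_eq_pvLoopB
      intro i hi
      rw [PySem.List.mem_pyRange_one] at hi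
      omega
    · intro i hi
      rw [PySem.List.mem_pyRange_one] at hi
      rw [pvDigitsA_eq_pvDs i (by omega)]
      have hds := pvDs_le n i hi.1 (by omega)
      have : i < n - 9 * L := by
        rcases max_cases 1 (n - 9 * L) with ⟨h1, h2⟩ | ⟨h1, h2⟩ <;> omega
      omega
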